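-- pv_equiv track=rewrite | github.com/niqibiao/unity-csharpconsole | Editor/ExternalTool~/console-client/repl/transcript_control.py | _split_fragments_by_newline
-- ===== SOURCE A (Python) =====
-- def _split_fragments_by_newline(fragments):
--     lines = [[]]
--     for style, text, *rest in fragments:
--         parts = text.split("\n")
--         for index, part in enumerate(parts):
--             if part:
--                 lines[-1].append((style, part, *rest))
--             if index < len(parts) - 1:
--                 lines.append([])
--     return lines
-- ===== SOURCE B (Python) =====
-- def _split_fragments_by_newline(fragments):
--     lines = [[]]
--     for style, text, *rest in fragments:
--         buf = ""
--         for ch in text: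
--             if ch == "\n":
--                 if buf:
--                     lines[-1].append((style, buf, *rest))
--                 lines.append([])
--                 buf = ""
--             else:
--                 buf += ch
--         if buf:
--             lines[-1].append((style, buf, *rest))
--     return lines
-- ===== Notes on version B (the rewrite author's own statement) =====
-- stated objective: alternative
-- what changed: B replaces the per-fragment text.split('\n') plus enumerate/index bookkeeping by a single character-level scan that keeps a running buffer and flushes it at each newline and at fragment end.
-- outside the precondition, e.g. on _split_fragments_by_newline([('only_style',)]): A raises ValueError, B raises ValueError
import Mathlib
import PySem

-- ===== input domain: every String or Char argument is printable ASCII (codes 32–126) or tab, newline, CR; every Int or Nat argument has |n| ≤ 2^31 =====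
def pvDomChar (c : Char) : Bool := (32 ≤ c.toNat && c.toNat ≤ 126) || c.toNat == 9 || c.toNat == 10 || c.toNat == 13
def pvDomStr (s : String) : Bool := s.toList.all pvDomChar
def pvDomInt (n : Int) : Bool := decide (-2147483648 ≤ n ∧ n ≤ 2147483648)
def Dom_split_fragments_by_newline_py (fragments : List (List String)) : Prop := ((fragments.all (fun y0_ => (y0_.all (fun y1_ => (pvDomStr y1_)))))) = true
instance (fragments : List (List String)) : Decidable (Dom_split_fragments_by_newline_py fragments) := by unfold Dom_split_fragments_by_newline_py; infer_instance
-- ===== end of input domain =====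

-- B replaces the per-fragment str.split + enumerate indexing by a single character-level
-- scan with a running buffer (objective: alternative decomposition, same cost).

-- ===== PORT A =====
-- lines[-1].append(e) for a list of lines (Python's lines is never empty here)
def pvPushLast (lines : List (List (List String))) (e : List String) : List (List (List String)) :=
  match lines with
  | [] => []
  | [l] => [l ++ [e]]
  | l :: ls => l :: pvPushLast ls e

def split_fragments_by_newline_py (fragments : List (List String)) : List (List (List String)) :=
  fragments.foldl (fun lines frag =>
    match frag with
    | style :: text :: rest =>
      let parts : List String := (PySem.Str.split? text "\n").getD []   -- sep ≠ "" so split? = some _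
      (PySem.List.enumerate parts).foldl (fun lines ip =>
        let lines1 := if ip.2 ≠ "" then pvPushLast lines (style :: ip.2 :: rest) else lines
        if ip.1 < (parts.length : Int) - 1 then lines1 ++ [[]] else lines1) lines
    | _ => lines   -- Python raises ValueError on a fragment of fewer than 2 items (outside Pre_)
  ) [[]]

-- ===== PORT B =====
-- lines[-1].append(e), B's own copy
def pvPushLastB (lines : List (List (List String))) (e : List String) : List (List (List String)) :=
  match lines with
  | [] => []
  | l :: ls => if ls.isEmpty then [l ++ [e]] else l :: pvPushLastB ls e

def split_fragments_by_newline_py_alt (fragments : List (List String)) : List (List (List String)) :=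
  fragments.foldl (fun lines frag =>
    match frag with
    | style :: text :: rest =>
      let st := text.toList.foldl (fun (st : List (List (List String)) × List Char) ch =>
        if ch = '\n' then
          ((if st.2 ≠ [] then pvPushLastB st.1 (style :: String.ofList st.2 :: rest) else st.1) ++ [[]], [])
        else (st.1, st.2 ++ [ch])) (lines, [])
      if st.2 ≠ [] then pvPushLastB st.1 (style :: String.ofList st.2 :: rest) else st.1
    | [] => lines    -- Python raises ValueError on a fragment of fewer than 2 items (outside Pre_)
    | [_] => lines
  ) [[]]

-- ===== PRECONDITION & SPEC =====
-- Pre_ excludes fragments with fewer than 2 items, on which Python A (and B) raise ValueError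
-- from the 'style, text, *rest' destructuring.
def Pre_split_fragments_by_newline_py (fragments : List (List String)) : Prop :=
  ∀ f ∈ fragments, 2 ≤ f.length
instance (fragments : List (List String)) : Decidable (Pre_split_fragments_by_newline_py fragments) := by unfold Pre_split_fragments_by_newline_py; infer_instance
def pvWitness_split_fragments_by_newline_py : List (List String) := [["bold", "a\nb", "x"], ["dim", "\n"]]
def Spec_split_fragments_by_newline_py (fragments : List (List String)) (out : List (List (List String))) : Prop := out = split_fragments_by_newline_py_alt fragments
instance (fragments : List (List String)) (out : List (List (List String))) : Decidable (Spec_split_fragments_by_newline_py fragments out) := by unfold Spec_split_fragments_by_newline_py; infer_instance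

-- ===== CLAIM (what is proved, stated in full; the proofs are below) =====
def Claim_equal_split_fragments_by_newline_py : Prop := ∀ (fragments : List (List String)), Dom_split_fragments_by_newline_py fragments → Pre_split_fragments_by_newline_py fragments → Spec_split_fragments_by_newline_py fragments (split_fragments_by_newline_py fragments)

-- ===== LEMMAS AND PROOFS =====

-- splitting a character list at '\n', front-to-back
def pvNlSplit : List Char → List (List Char)
  | [] => [[]]
  | c :: cs =>
    if c = '\n' then [] :: pvNlSplit cs
    else match pvNlSplit cs with
      | [] => [[c]]
      | p :: ps => (c :: p) :: ps

def pvMapFirst (f : List Char → List Char) : List (List Char) → List (List Char)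
  | [] => []
  | p :: ps => f p :: ps

lemma pvNlSplit_ne_nil (cs : List Char) : pvNlSplit cs ≠ [] := by
  cases cs with
  | nil => simp [pvNlSplit]
  | cons c cs =>
    simp only [pvNlSplit]
    split
    · simp
    · split <;> simp

-- the common "process the parts of one fragment" recursion both ports reduce to
def pvProc (style : String) (rest : List String)
    (lines : List (List (List String))) : List (List Char) → List (List (List String))
  | [] => lines
  | [p] => if p ≠ [] then pvPushLast lines (style :: String.ofList p :: rest) else lines
  | p :: q :: ps =>
    pvProc style rest
      ((if p ≠ [] then pvPushLast lines (style :: String.ofList p :: rest) else lines) ++ [[]])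
      (q :: ps)

lemma pvPushLastB_eq : ∀ (lines : List (List (List String))) (e : List String),
    pvPushLastB lines e = pvPushLast lines e := by
  intro lines e
  induction lines with
  | nil => rfl
  | cons l ls ih =>
    cases ls with
    | nil => rfl
    | cons m ms =>
      show l :: pvPushLastB (m :: ms) e = l :: pvPushLast (m :: ms) e
      rw [ih]

lemma pvMapFirst_nil_fun (xs : List (List Char)) : pvMapFirst (fun p => [] ++ p) xs = xs := by
  cases xs <;> rfl

lemma pv_go_cons (f : Nat) (c : Char) (rest cur : List Char) (accs : List (List Char)) :
    PySem.Chars.splitOn.go ['\n'] (f+1) (c :: rest) cur accs =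
      if c = '\n' then PySem.Chars.splitOn.go ['\n'] f rest [] (cur.reverse :: accs)
      else PySem.Chars.splitOn.go ['\n'] f rest (c :: cur) accs := by
  rw [PySem.Chars.splitOn.go]
  by_cases hc : c = '\n'
  · simp [hc, List.isPrefixOf]
  · simp only [List.isPrefixOf, Bool.and_eq_true, beq_iff_eq, and_true]
    rw [if_neg (fun h => hc h.symm), if_neg hc]

lemma pv_go_nil (f : Nat) (cur : List Char) (accs : List (List Char)) :
    PySem.Chars.splitOn.go ['\n'] (f+1) [] cur accs = (cur.reverse :: accs).reverse := by
  rw [PySem.Chars.splitOn.go]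
  simp

lemma pv_go_eq : ∀ (fuel : Nat) (l cur : List Char) (accs : List (List Char)),
    l.length < fuel →
    PySem.Chars.splitOn.go ['\n'] fuel l cur accs =
      accs.reverse ++ pvMapFirst (cur.reverse ++ ·) (pvNlSplit l) := by
  intro fuel
  induction fuel with
  | zero => intro l cur accs h; exact absurd h (Nat.not_lt_zero _)
  | succ f ih =>
    intro l cur accs h
    cases l with
    | nil =>
      rw [pv_go_nil]
      simp [pvNlSplit, pvMapFirst]
    | cons c rest =>
      rw [pv_go_cons]
      by_cases hc : c = '\n'
      · rw [if_pos hc, ih rest [] _ (by simpa using h)]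
        subst hc
        obtain ⟨p, ps, hps⟩ : ∃ p ps, pvNlSplit rest = p :: ps := by
          cases hx : pvNlSplit rest with
          | nil => exact absurd hx (pvNlSplit_ne_nil rest)
          | cons p ps => exact ⟨p, ps, rfl⟩
        simp [pvNlSplit, pvMapFirst, hps]
      · rw [if_neg hc, ih rest (c :: cur) accs (by simpa using h)]
        obtain ⟨p, ps, hps⟩ : ∃ p ps, pvNlSplit rest = p :: ps := by
          cases hx : pvNlSplit rest with
          | nil => exact absurd hx (pvNlSplit_ne_nil rest)
          | cons p ps => exact ⟨p, ps, rfl⟩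
        simp [pvNlSplit, hc, hps, pvMapFirst]

lemma pv_splitOn_nl (s : List Char) : PySem.Chars.splitOn s ['\n'] = pvNlSplit s := by
  rw [PySem.Chars.splitOn]
  rw [pv_go_eq (s.length + 1) s [] [] (Nat.lt_succ_self _)]
  obtain ⟨p, ps, hps⟩ : ∃ p ps, pvNlSplit s = p :: ps := by
    cases hx : pvNlSplit s with
    | nil => exact absurd hx (pvNlSplit_ne_nil s)
    | cons p ps => exact ⟨p, ps, rfl⟩
  simp [hps, pvMapFirst]

lemma pv_parts_eq (text : String) :
    (PySem.Str.split? text "\n").getD [] = (pvNlSplit text.toList).map String.ofList := by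
  have h := PySem.Str.split?_map text "\n"
  rw [show ("\n" : String).toList = ['\n'] from rfl] at h
  rw [show PySem.Chars.split? text.toList ['\n'] = some (pvNlSplit text.toList) by
        simp [PySem.Chars.split?, pv_splitOn_nl]] at h
  cases hsp : PySem.Str.split? text "\n" with
  | none => rw [hsp] at h; simp at h
  | some ps =>
    rw [hsp] at h
    simp only [Option.map_some, Option.some.injEq] at h
    simp [← h, List.map_map, Function.comp_def, String.ofList_toList]

lemma pv_enum_fold_eq (style : String) (rest : List String) :
    ∀ (qs : List String) (k n : Nat) (lines : List (List (List String))),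
    k + qs.length = n →
    (PySem.List.enumerate qs (k : Int)).foldl (fun lines ip =>
        let lines1 := if ip.2 ≠ "" then pvPushLast lines (style :: ip.2 :: rest) else lines
        if ip.1 < (n : Int) - 1 then lines1 ++ [[]] else lines1) lines
      = pvProc style rest lines (qs.map String.toList) := by
  intro qs
  induction qs with
  | nil => intro k n lines hkn; simp [PySem.List.enumerate_nil, pvProc]
  | cons p qs ih =>
    intro k n lines hkn
    rw [PySem.List.enumerate_cons]
    simp only [List.foldl_cons]
    cases qs with
    | nil =>
      have hk : ¬ ((k : Int) < (n : Int) - 1) := by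
        simp at hkn; omega
      simp only [PySem.List.enumerate_nil, List.foldl_nil, if_neg hk]
      simp only [List.map_cons, List.map_nil, pvProc]
      by_cases hp : p = ""
      · simp [hp]
      · simp [hp, String.toList_eq_nil_iff, String.ofList_toList]
    | cons q qs' =>
      have hk : ((k : Int) < (n : Int) - 1) := by
        simp at hkn; omega
      simp only [if_pos hk]
      have h1 : ((k : Int) + 1) = ((k + 1 : Nat) : Int) := by push_cast; ring
      rw [h1, ih (k + 1) n _ (by simp at hkn ⊢; omega)]
      simp only [List.map_cons, pvProc]
      by_cases hp : p = ""
      · simp [hp]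
      · simp [hp, String.toList_eq_nil_iff, String.ofList_toList]

lemma pv_scan_eq (style : String) (rest : List String) :
    ∀ (cs : List Char) (lines : List (List (List String))) (buf : List Char),
    (let st := cs.foldl (fun (st : List (List (List String)) × List Char) ch =>
        if ch = '\n' then
          ((if st.2 ≠ [] then pvPushLastB st.1 (style :: String.ofList st.2 :: rest) else st.1) ++ [[]], [])
        else (st.1, st.2 ++ [ch])) (lines, buf)
     if st.2 ≠ [] then pvPushLastB st.1 (style :: String.ofList st.2 :: rest) else st.1)
      = pvProc style rest lines (pvMapFirst (buf ++ ·) (pvNlSplit cs)) := by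
  simp only [pvPushLastB_eq]
  intro cs
  induction cs with
  | nil =>
    intro lines buf
    simp only [List.foldl_nil, pvNlSplit, pvMapFirst, pvProc, List.append_nil]
  | cons c cs ih =>
    intro lines buf
    simp only [List.foldl_cons]
    by_cases hc : c = '\n'
    · simp only [if_pos hc]
      rw [ih _ []]
      obtain ⟨p, ps, hps⟩ : ∃ p ps, pvNlSplit cs = p :: ps := by
        cases hx : pvNlSplit cs with
        | nil => exact absurd hx (pvNlSplit_ne_nil cs)
        | cons p ps => exact ⟨p, ps, rfl⟩
      subst hc
      simp [pvNlSplit, hps, pvMapFirst, pvProc]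
    · simp only [if_neg hc]
      rw [ih _ (buf ++ [c])]
      obtain ⟨p, ps, hps⟩ : ∃ p ps, pvNlSplit cs = p :: ps := by
        cases hx : pvNlSplit cs with
        | nil => exact absurd hx (pvNlSplit_ne_nil cs)
        | cons p ps => exact ⟨p, ps, rfl⟩
      simp [pvNlSplit, hc, hps, pvMapFirst]

lemma pv_frag_step (lines : List (List (List String))) (frag : List String) :
    (match frag with
    | style :: text :: rest =>
      let parts : List String := (PySem.Str.split? text "\n").getD []
      (PySem.List.enumerate parts).foldl (fun lines ip =>
        let lines1 := if ip.2 ≠ "" then pvPushLast lines (style :: ip.2 :: rest) else lines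
        if ip.1 < (parts.length : Int) - 1 then lines1 ++ [[]] else lines1) lines
    | _ => lines)
    = (match frag with
    | style :: text :: rest =>
      let st := text.toList.foldl (fun (st : List (List (List String)) × List Char) ch =>
        if ch = '\n' then
          ((if st.2 ≠ [] then pvPushLastB st.1 (style :: String.ofList st.2 :: rest) else st.1) ++ [[]], [])
        else (st.1, st.2 ++ [ch])) (lines, [])
      if st.2 ≠ [] then pvPushLastB st.1 (style :: String.ofList st.2 :: rest) else st.1
    | [] => lines
    | [_] => lines) := by
  match frag with
  | [] => rfl
  | [_] => rfl
  | style :: text :: rest =>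
    simp only
    rw [pv_scan_eq style rest text.toList lines [], pvMapFirst_nil_fun]
    rw [pv_parts_eq]
    have h0 : ((0 : Int)) = ((0 : Nat) : Int) := by norm_num
    rw [show PySem.List.enumerate ((pvNlSplit text.toList).map String.ofList)
          = PySem.List.enumerate ((pvNlSplit text.toList).map String.ofList) ((0 : Nat) : Int) by norm_num]
    rw [pv_enum_fold_eq style rest _ 0 ((pvNlSplit text.toList).map String.ofList).length lines (by simp)]
    simp [List.map_map, Function.comp_def, String.toList_ofList]

-- ===== VERDICT (by name: the statement is the Claim_ definition above) =====
theorem split_fragments_by_newline_py_spec : Claim_equal_split_fragments_by_newline_py := by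
  intro fragments _ _
  unfold Spec_split_fragments_by_newline_py split_fragments_by_newline_py split_fragments_by_newline_py_alt
  apply List.foldl_ext
  intro lines frag _
  exact pv_frag_step lines frag
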